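-- pv_equiv track=rewrite | github.com/JuliCai/TextScratch | textscratch/string_utils.py | strip_inline_literals
-- ===== SOURCE A (Python) =====
-- from typing import Dict, List, Optional, Tuple
--
-- def remove_literal_top_level(text: str, literal: str) -> str:
--     """Remove the first top-level occurrence of a literal from text."""
--     depth = 0
--     idx = 0
--     limit = len(text)
--     lit_len = len(literal)
--
--     while idx <= limit - lit_len:
--         ch = text[idx]
--         if ch in "([{<":
--             depth += 1
--             idx += 1
--             continue
--         if ch in ")]}>" and depth > 0:
--             depth -= 1
--         if depth == 0 and text.startswith(literal, idx):
--             left = text[:idx].rstrip()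
--             right = text[idx + lit_len :].lstrip()
--             mid = " " if left and right else ""
--             return (left + mid + right).strip()
--         idx += 1
--
--     return text
--
-- def strip_inline_literals(text: str, literals: List[str]) -> str:
--     """Remove multiple literals from text at the top level."""
--     result = text
--     for literal in literals:
--         lit = literal.strip()
--         if not lit:
--             continue
--         result = remove_literal_top_level(result, lit)
--     return result
-- ===== SOURCE B (Python) =====
-- from typing import List
--
-- def _remove_top_level(text: str, lit: str) -> str:
--     """Find candidate occurrences with rest.find(lit) and keep an incremental
--     bracket depth instead of scanning every character for a match."""
--     depth = 0
--     pos = 0          # absolute index of the start of `rest` in `text`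
--     rest = text
--     while True:
--         j = rest.find(lit)
--         if j < 0:
--             return text
--         for ch in rest[:j]:
--             if ch in "([{<":
--                 depth += 1
--             elif ch in ")]}>" and depth > 0:
--                 depth -= 1
--         i = pos + j
--         ch = rest[j]
--         d = depth - 1 if (ch in ")]}>" and depth > 0) else depth
--         if d == 0 and ch not in "([{<":
--             left = text[:i].rstrip()
--             right = text[i + len(lit):].lstrip()
--             mid = " " if left and right else ""
--             return (left + mid + right).strip()
--         depth = depth + 1 if ch in "([{<" else d
--         pos = i + 1
--         rest = rest[j + 1:]
--
-- def strip_inline_literals(text: str, literals: List[str]) -> str: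
--     result = text
--     for literal in literals:
--         lit = literal.strip()
--         if lit:
--             result = _remove_top_level(result, lit)
--     return result
-- ===== Notes on version B (the rewrite author's own statement) =====
-- stated objective: faster
-- what changed: remove_literal_top_level's per-character while-loop that tests startswith at every index is replaced by a loop over rest.find(lit) candidate occurrences that catches up the bracket depth incrementally over the skipped span and applies the same depth-0/non-opening-bracket acceptance rule.
import Mathlib
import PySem

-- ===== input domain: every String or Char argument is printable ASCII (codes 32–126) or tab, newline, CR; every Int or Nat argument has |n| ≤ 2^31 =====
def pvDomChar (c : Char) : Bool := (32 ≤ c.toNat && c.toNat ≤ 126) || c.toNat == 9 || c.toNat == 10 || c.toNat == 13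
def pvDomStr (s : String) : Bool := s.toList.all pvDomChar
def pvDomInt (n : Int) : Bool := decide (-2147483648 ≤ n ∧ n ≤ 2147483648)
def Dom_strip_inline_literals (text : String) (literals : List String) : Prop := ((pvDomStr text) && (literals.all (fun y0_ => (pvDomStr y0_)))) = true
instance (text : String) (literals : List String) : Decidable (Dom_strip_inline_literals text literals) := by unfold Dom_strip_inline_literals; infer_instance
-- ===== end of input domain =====

-- B replaces A's per-character scan of remove_literal_top_level by a rest.find(lit)-driven
-- candidate loop with an incremental bracket depth (objective: alternative decomposition).
-- Shared one-line helpers of both Pythons: membership in "([{<" / ")]}>" and the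
-- identical left/mid/right join-and-strip return expression.
def pvOpen (c : Char) : Bool := c == '(' || c == '[' || c == '{' || c == '<'
def pvClose (c : Char) : Bool := c == ')' || c == ']' || c == '}' || c == '>'

def pvBuild (t : List Char) (i L : Nat) : List Char :=
  let left := PySem.Chars.rstrip (t.take i)
  let right := PySem.Chars.lstrip (t.drop (i + L))
  let mid := if left ≠ [] ∧ right ≠ [] then [' '] else []
  PySem.Chars.strip (left ++ mid ++ right)

-- ===== PORT A =====
-- the while-loop of remove_literal_top_level; text[idx] is in range whenever the
-- loop guard holds and lit ≠ [] (the only way strip_inline_literals calls it)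
def removeA (t lit : List Char) (depth idx : Nat) : List Char :=
  if h : (idx : Int) ≤ (t.length : Int) - (lit.length : Int) then
    if pvOpen (t.getD idx ' ') then removeA t lit (depth + 1) (idx + 1)
    else
      if (if pvClose (t.getD idx ' ') && decide (0 < depth) then depth - 1 else depth) = 0
          && lit.isPrefixOf (t.drop idx) then
        pvBuild t idx lit.length
      else
        removeA t lit
          (if pvClose (t.getD idx ' ') && decide (0 < depth) then depth - 1 else depth) (idx + 1)
  else t
termination_by t.length + 1 - idx
decreasing_by all_goals omega

def strip_inline_literals (text : String) (literals : List String) : String :=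
  String.mk (literals.foldl (fun res l =>
    let lit := PySem.Chars.strip l.toList
    if lit.isEmpty then res else removeA res lit 0 0) text.toList)

-- ===== PORT B =====
-- the bracket-depth update B applies to each character it jumps over
def stepB (depth : Nat) (c : Char) : Nat :=
  if pvOpen c then depth + 1
  else if pvClose c && decide (0 < depth) then depth - 1 else depth

-- the while-loop of B's _remove_top_level: rest = text[pos:], candidates by rest.find(lit)
def removeB (t lit : List Char) (hlit : lit ≠ []) (depth pos : Nat) (rest : List Char) : List Char :=
  if hj : PySem.Chars.find rest lit = -1 then t
  else
    if (if pvClose (rest.getD (PySem.Chars.find rest lit).toNat ' ')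
            && decide (0 < (rest.take (PySem.Chars.find rest lit).toNat).foldl stepB depth)
          then (rest.take (PySem.Chars.find rest lit).toNat).foldl stepB depth - 1
          else (rest.take (PySem.Chars.find rest lit).toNat).foldl stepB depth) = 0
        && !(pvOpen (rest.getD (PySem.Chars.find rest lit).toNat ' ')) then
      pvBuild t (pos + (PySem.Chars.find rest lit).toNat) lit.length
    else
      removeB t lit hlit
        (if pvOpen (rest.getD (PySem.Chars.find rest lit).toNat ' ')
          then (rest.take (PySem.Chars.find rest lit).toNat).foldl stepB depth + 1
          else if pvClose (rest.getD (PySem.Chars.find rest lit).toNat ' ')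
              && decide (0 < (rest.take (PySem.Chars.find rest lit).toNat).foldl stepB depth)
            then (rest.take (PySem.Chars.find rest lit).toNat).foldl stepB depth - 1
            else (rest.take (PySem.Chars.find rest lit).toNat).foldl stepB depth)
        (pos + (PySem.Chars.find rest lit).toNat + 1)
        (rest.drop ((PySem.Chars.find rest lit).toNat + 1))
termination_by rest.length
decreasing_by
  have hinf : lit <:+: rest := (PySem.Chars.find_ne_neg_one_iff rest lit).mp hj
  have h1 : lit.length ≤ rest.length := hinf.length_le
  have h2 : 0 < lit.length := List.length_pos_iff.mpr hlit
  simp only [List.length_drop]; omega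

def strip_inline_literals_alt (text : String) (literals : List String) : String :=
  String.mk (literals.foldl (fun res l =>
    let lit := PySem.Chars.strip l.toList
    if h : lit = [] then res else removeB res lit h 0 0 res) text.toList)

-- ===== PRECONDITION & SPEC =====
def Spec_strip_inline_literals (text : String) (literals : List String) (out : String) : Prop := out = strip_inline_literals_alt text literals
instance (text : String) (literals : List String) (out : String) : Decidable (Spec_strip_inline_literals text literals out) := by unfold Spec_strip_inline_literals; infer_instance

-- ===== CLAIM (what is proved, stated in full; the proofs are below) =====
def Claim_equal_strip_inline_literals : Prop := ∀ (text : String) (literals : List String), Dom_strip_inline_literals text literals → Spec_strip_inline_literals text literals (strip_inline_literals text literals)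

-- ===== LEMMAS AND PROOFS =====

-- infix of a later suffix is an infix of an earlier one
lemma infix_drop_succ {t lit : List Char} {idx : Nat} (h : lit <:+: t.drop (idx + 1)) :
    lit <:+: t.drop idx := by
  have hd : t.drop (idx + 1) = (t.drop idx).drop 1 := by rw [List.drop_drop]
  exact (hd ▸ h).trans (List.drop_suffix 1 (t.drop idx)).isInfix

-- if lit occurs nowhere in t.drop idx, A's loop falls off the end and returns t
lemma removeA_no_match (t lit : List Char) (depth idx : Nat)
    (h : ¬ lit <:+: t.drop idx) : removeA t lit depth idx = t := by
  revert h
  induction depth, idx using removeA.induct t lit with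
  | case1 depth idx hg ho ih =>
    intro h
    rw [removeA, dif_pos hg, if_pos ho]
    exact ih (fun hx => h (infix_drop_succ hx))
  | case2 depth idx hg ho hc =>
    intro h
    exfalso
    simp only [Bool.and_eq_true] at hc
    exact h (List.isPrefixOf_iff_prefix.mp hc.2).isInfix
  | case3 depth idx hg ho hc ih =>
    intro h
    rw [removeA, dif_pos hg, if_neg (by simpa using ho), if_neg (by simpa using hc)]
    exact ih (fun hx => h (infix_drop_succ hx))
  | case4 depth idx hg =>
    intro _
    rw [removeA, dif_neg hg]

-- scanning j match-free positions from pos updates the depth by foldl stepB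
lemma removeA_advance (t lit : List Char) (hlit : lit ≠ []) :
    ∀ (j pos depth : Nat), (∀ k < j, ¬ lit <+: t.drop (pos + k)) → lit <+: t.drop (pos + j) →
      removeA t lit depth pos = removeA t lit (((t.drop pos).take j).foldl stepB depth) (pos + j) := by
  intro j
  induction j with
  | zero => intro pos depth _ _; simp
  | succ jj ih =>
    intro pos depth hno hmatch
    have hlitpos : 0 < lit.length := List.length_pos_iff.mpr hlit
    have hlp : lit.length ≤ t.length - (pos + (jj + 1)) := by
      simpa using hmatch.length_le
    have hposlt : pos < t.length := by omega
    have hguard : (pos : Int) ≤ (t.length : Int) - (lit.length : Int) := by omega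
    have hcons : t.drop pos = t[pos] :: t.drop (pos + 1) := List.drop_eq_getElem_cons hposlt
    have hch : t.getD pos ' ' = t[pos] := List.getD_eq_getElem t ' ' hposlt
    have hno' : ∀ k < jj, ¬ lit <+: t.drop (pos + 1 + k) := by
      intro k hk
      have := hno (k + 1) (by omega)
      simpa [Nat.add_assoc, Nat.add_comm 1 k] using this
    have hmatch' : lit <+: t.drop (pos + 1 + jj) := by
      have heq : pos + 1 + jj = pos + (jj + 1) := by omega
      rw [heq]; exact hmatch
    rw [removeA, dif_pos hguard, hch]
    by_cases ho : pvOpen t[pos]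
    · rw [if_pos ho, ih (pos + 1) (depth + 1) hno' hmatch', hcons, List.take_succ_cons,
        List.foldl_cons]
      have hstep : stepB depth t[pos] = depth + 1 := by
        simp [stepB, ho]
      rw [hstep]
      congr 1
      omega
    · have hp : lit.isPrefixOf (t.drop pos) = false :=
        Bool.eq_false_iff.mpr (fun hx => by
          have h0 := hno 0 (by omega)
          simp only [Nat.add_zero] at h0
          exact h0 (List.isPrefixOf_iff_prefix.mp hx))
      rw [if_neg (by simpa using ho), if_neg (by simp [hp])]
      rw [ih (pos + 1) _ hno' hmatch', hcons, List.take_succ_cons, List.foldl_cons]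
      have hstep : stepB depth t[pos]
          = if pvClose t[pos] && decide (0 < depth) then depth - 1 else depth := by
        have hob : pvOpen t[pos] = false := by simpa using ho
        simp [stepB, hob]
      rw [hstep]
      congr 1
      omega

lemma removeA_eq_removeB (t lit : List Char) (hlit : lit ≠ []) :
    ∀ (n : Nat) (rest : List Char) (depth pos : Nat), rest.length = n → rest = t.drop pos →
      removeA t lit depth pos = removeB t lit hlit depth pos rest := by
  intro n
  induction n using Nat.strong_induction_on with
  | _ n ih =>
    intro rest depth pos hn hr
    rw [removeB]
    by_cases hj : PySem.Chars.find rest lit = -1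
    · rw [dif_pos hj]
      exact removeA_no_match t lit depth pos
        (by rw [← hr]; exact (PySem.Chars.find_eq_neg_one_iff rest lit).mp hj)
    · rw [dif_neg hj]
      have hj0 : 0 ≤ PySem.Chars.find rest lit := by
        have := PySem.Chars.neg_one_le_find rest lit; omega
      obtain ⟨hpre, hmin⟩ := PySem.Chars.find_spec hj0
      set jn := (PySem.Chars.find rest lit).toNat with hjn
      have hdropk : ∀ k : Nat, rest.drop k = t.drop (pos + k) := by
        intro k; rw [hr, List.drop_drop]
      have hpre' : lit <+: t.drop (pos + jn) := by rw [← hdropk]; exact hpre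
      have hmin' : ∀ k < jn, ¬ lit <+: t.drop (pos + k) := by
        intro k hk; rw [← hdropk]; exact hmin k hk
      have hlitpos : 0 < lit.length := List.length_pos_iff.mpr hlit
      have hlp : lit.length ≤ rest.length - jn := by
        simpa using hpre.length_le
      have hrl : rest.length = t.length - pos := by rw [hr, List.length_drop]
      have hjnlt : jn < rest.length := by omega
      have hposjn : pos + jn + lit.length ≤ t.length := by omega
      have hadv := removeA_advance t lit hlit jn pos depth hmin' hpre'
      rw [← hr] at hadv
      rw [hadv, removeA,
        dif_pos (by omega : ((pos + jn : Nat) : Int) ≤ (t.length : Int) - (lit.length : Int))]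
      have hch : t.getD (pos + jn) ' ' = rest.getD jn ' ' := by
        rw [hr]; simp [List.getD_eq_getElem?_getD, List.getElem?_drop]
      rw [hch]
      set ch := rest.getD jn ' ' with hchv
      set F := (rest.take jn).foldl stepB depth with hF
      have hrec := fun d => ih (rest.length - (jn + 1)) (by omega) (rest.drop (jn + 1))
        d (pos + jn + 1) (by simp)
        (by rw [hr, List.drop_drop, ← Nat.add_assoc])
      by_cases ho : pvOpen ch
      · rw [if_pos ho,
          if_neg (fun hx => by
            simp only [ho, Bool.not_true, Bool.and_false] at hx
            exact Bool.false_ne_true hx),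
          if_pos ho]
        exact hrec _
      · have hob : pvOpen ch = false := by simpa using ho
        have hpA : lit.isPrefixOf (t.drop (pos + jn)) = true := List.isPrefixOf_iff_prefix.mpr hpre'
        rw [if_neg (by simpa using ho)]
        simp only [hob, hpA, Bool.not_false, Bool.and_true, Bool.false_eq_true, if_false]
        rcases Bool.eq_false_or_eq_true (pvClose ch && decide (0 < F)) with hc | hc
        · rw [if_pos hc]
          by_cases hz : F - 1 = 0
          · rw [if_pos (decide_eq_true hz), if_pos (decide_eq_true hz)]
          · rw [if_neg (fun hx => hz (of_decide_eq_true hx)),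
              if_neg (fun hx => hz (of_decide_eq_true hx))]
            exact hrec _
        · rw [if_neg (show ¬((pvClose ch && decide (0 < F)) = true) from fun hx => by
            rw [hc] at hx; exact Bool.false_ne_true hx)]
          by_cases hz : F = 0
          · rw [if_pos (decide_eq_true hz), if_pos (decide_eq_true hz)]
          · rw [if_neg (fun hx => hz (of_decide_eq_true hx)),
              if_neg (fun hx => hz (of_decide_eq_true hx))]
            exact hrec _

-- ===== VERDICT (by name: the statement is the Claim_ definition above) =====
theorem strip_inline_literals_spec : Claim_equal_strip_inline_literals := by
  intro text literals _
  unfold Spec_strip_inline_literals strip_inline_literals strip_inline_literals_alt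
  congr 1
  have hfun : (fun (res : List Char) (l : String) =>
      let lit := PySem.Chars.strip l.toList
      if lit.isEmpty then res else removeA res lit 0 0)
    = (fun (res : List Char) (l : String) =>
      let lit := PySem.Chars.strip l.toList
      if h : lit = [] then res else removeB res lit h 0 0 res) := by
    funext res l
    dsimp only
    by_cases h : PySem.Chars.strip l.toList = []
    · simp [h]
    · rw [if_neg (by simpa [List.isEmpty_iff] using h), dif_neg h]
      exact removeA_eq_removeB res _ h res.length res 0 0 rfl (by simp)
  rw [hfun]
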